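-- pv_equiv track=rewrite | github.com/linhdvu14/cp-sols | sols/CodeForces/1616_d12_goodbye2021/D_Keep_the_Average_High.py | solve
-- ===== SOURCE A (Python) =====
-- def solve(N, A, X):
--     A = [a-X for a in A]
--     res = start = 0
--     for i in range(N):
--         good = True
--         if i - start >= 1 and A[i] + A[i-1] < 0: good = False
--         if i - start >= 2 and A[i] + A[i-1] + A[i-2] < 0: good = False
--         if not good:  # exclude i
--             res += 1
--             start = i + 1
--     return N - res
-- ===== SOURCE B (Python) =====
-- def solve(N, A, X):
--     # Small-state DP on minimum deletions instead of A's greedy scan.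
--     # State after each prefix: least deletions so that the kept suffix-run has
--     # no kept element (dE), exactly one kept element (d1), or two-or-more kept
--     # elements (d2); None = unreachable.  The adjusted values of the last one/
--     # two array positions (p1, p2) are what those runs would end with.
--     # Answer = N - optimum over the three states.
--     dE, d1, d2 = 0, None, None
--     p1 = p2 = 0
--     for a in A[:max(N, 0)]:
--         c = a - X
--         ndE = min([dE] + [d for d in (d1, d2) if d is not None]) + 1
--         nd1 = dE
--         nd2 = None
--         if d1 is not None and p1 + c >= 0:
--             nd2 = d1
--         if d2 is not None and p1 + c >= 0 and p2 + p1 + c >= 0: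
--             nd2 = d2 if nd2 is None else min(nd2, d2)
--         dE, d1, d2 = ndE, nd1, nd2
--         p2, p1 = p1, c
--     return N - min([dE] + [d for d in (d1, d2) if d is not None])
-- ===== Notes on version B (the rewrite author's own statement) =====
-- stated objective: alternative
-- what changed: Replaces A's greedy scan (delete-when-bad with a segment-start reset) by a three-state dynamic program over minimum deletions (run tail empty / one kept / two-or-more kept), returning N minus the DP optimum; the proof carries an invariant showing the DP optimum always equals the greedy's deletion count.
-- outside the precondition, e.g. on solve(3, [0, -5], 0): A returns 2, B returns 2
import Mathlib
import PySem

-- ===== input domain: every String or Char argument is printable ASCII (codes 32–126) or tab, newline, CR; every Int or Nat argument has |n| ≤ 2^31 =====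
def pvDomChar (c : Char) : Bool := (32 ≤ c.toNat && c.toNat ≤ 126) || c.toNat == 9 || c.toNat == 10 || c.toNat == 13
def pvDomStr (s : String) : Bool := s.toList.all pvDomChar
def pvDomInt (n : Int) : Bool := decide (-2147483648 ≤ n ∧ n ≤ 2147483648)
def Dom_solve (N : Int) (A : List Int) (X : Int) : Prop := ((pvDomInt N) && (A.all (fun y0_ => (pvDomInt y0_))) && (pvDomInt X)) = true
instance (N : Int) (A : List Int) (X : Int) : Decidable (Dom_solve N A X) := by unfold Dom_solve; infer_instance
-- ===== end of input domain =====

-- B replaces A's greedy delete-when-bad scan by a three-state dynamic program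
-- over minimum deletions (run tail empty / one kept / two-or-more kept) and
-- returns N minus the DP optimum; the proof shows the DP optimum equals the
-- greedy deletion count on every admitted input.  Same O(N) cost.

-- ===== PORT A =====
-- Loop body of A; pyGetD is exact under Pre_ (the guards i-start≥1 / ≥2 put the
-- accessed indices in range whenever the sum is actually evaluated; Python
-- short-circuits `and`, so the default of pyGetD is never the decided value).
def stepA (A' : List Int) (s : Int × Int) (i : Int) : Int × Int :=
  let good := true
  let good := if i - s.2 ≥ 1 ∧ PySem.List.pyGetD A' i 0 + PySem.List.pyGetD A' (i-1) 0 < 0 then false else good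
  let good := if i - s.2 ≥ 2 ∧ PySem.List.pyGetD A' i 0 + PySem.List.pyGetD A' (i-1) 0 + PySem.List.pyGetD A' (i-2) 0 < 0 then false else good
  if good = false then (s.1 + 1, i + 1) else s

def solve (N : Int) (A : List Int) (X : Int) : Int :=
  let A' := A.map (fun a => a - X)
  let fin := (PySem.List.pyRange 0 N 1).foldl (stepA A') (0, 0)
  N - fin.1

-- ===== PORT B =====
-- Python's min over a two/three-element list, folded left.
def minO (x : Int) (o : Option Int) : Int := match o with | none => x | some v => min x v

-- DP step of B; state = (dE, d1, d2, p2, p1): least deletions for a prefix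
-- whose kept tail-run is empty / one element / two-or-more elements (none =
-- unreachable), plus the adjusted values of the two preceding array positions.
def stepB (X : Int) (s : Int × Option Int × Option Int × Int × Int) (a : Int) :
    Int × Option Int × Option Int × Int × Int :=
  let c := a - X
  let ndE := minO (minO s.1 s.2.1) s.2.2.1 + 1
  let nd1 : Option Int := some s.1
  let nd2 : Option Int :=
    match s.2.1 with
    | some v => if s.2.2.2.2 + c ≥ 0 then some v else none
    | none => none
  let nd2 : Option Int :=
    match s.2.2.1 with
    | some w =>
        if s.2.2.2.2 + c ≥ 0 ∧ s.2.2.2.1 + s.2.2.2.2 + c ≥ 0 then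
          (match nd2 with | none => some w | some u => some (min u w))
        else nd2
    | none => nd2
  (ndE, nd1, nd2, s.2.2.2.2, c)

def solve_alt (N : Int) (A : List Int) (X : Int) : Int :=
  let fin := (PySem.List.slice A (some 0) (some (max N 0))).foldl (stepB X) (0, none, none, 0, 0)
  N - minO (minO fin.1 fin.2.1) fin.2.2.1

-- ===== PRECONDITION & SPEC =====
-- Pre_ excludes N > len(A), where Python A raises IndexError — except the
-- accidental corner N = len(A)+1 reached only when the scan deletes the last
-- element (A then returns, and B returns the same value there).
def Pre_solve (N : Int) (A : List Int) (X : Int) : Prop := N ≤ (A.length : Int)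
instance (N : Int) (A : List Int) (X : Int) : Decidable (Pre_solve N A X) := by unfold Pre_solve; infer_instance
def pvWitness_solve : Int × List Int × Int := (3, [4, -1, 2], 1)

def Spec_solve (N : Int) (A : List Int) (X : Int) (out : Int) : Prop := out = solve_alt N A X
instance (N : Int) (A : List Int) (X : Int) (out : Int) : Decidable (Spec_solve N A X out) := by unfold Spec_solve; infer_instance

-- ===== CLAIM (what is proved, stated in full; the proofs are below) =====
def Claim_equal_solve : Prop := ∀ (N : Int) (A : List Int) (X : Int), Dom_solve N A X → Pre_solve N A X → Spec_solve N A X (solve N A X)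

-- ===== LEMMAS AND PROOFS =====

-- The DP invariant tying B's state after j elements to A's greedy state
-- (res, start): dE/d1/d2 are exactly res plus 0/1 as dictated by the length
-- j - start of the current greedy segment (with only a lower bound where the
-- greedy segment is too short to pin the state down), and p1/p2 hold the
-- adjusted values at positions j-1 / j-2.
def InvB (b : List Int) (start : Int) (j : Nat) (res : Int)
    (s : Int × Option Int × Option Int × Int × Int) : Prop :=
  s.1 = res + (if start ≤ (j:Int) - 1 then 1 else 0)
  ∧ (if start ≤ (j:Int) - 1 then s.2.1 = some (res + (if start ≤ (j:Int) - 2 then 1 else 0))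
      else ∀ v, s.2.1 = some v → res ≤ v)
  ∧ (if start ≤ (j:Int) - 2 then s.2.2.1 = some res
      else ∀ v, s.2.2.1 = some v → res ≤ v)
  ∧ (1 ≤ j → s.2.2.2.2 = b.getD (j-1) 0)
  ∧ (2 ≤ j → s.2.2.2.1 = b.getD (j-2) 0)

-- Under the invariant the DP optimum equals the greedy deletion count.
lemma bestOf_inv (b : List Int) (start : Int) (j : Nat) (res : Int)
    (s : Int × Option Int × Option Int × Int × Int)
    (h0 : 0 ≤ start) (hs : start ≤ (j:Int)) (hI : InvB b start j res s) :
    minO (minO s.1 s.2.1) s.2.2.1 = res := by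
  obtain ⟨h1, h2, h3, -, -⟩ := hI
  by_cases hA : start ≤ (j:Int) - 1 <;> by_cases hB : start ≤ (j:Int) - 2
  · rw [if_pos hA] at h1; rw [if_pos hA, if_pos hB] at h2; rw [if_pos hB] at h3
    simp only [h1, h2, h3, minO]; omega
  · rw [if_pos hA] at h1; rw [if_pos hA, if_neg hB] at h2; rw [if_neg hB] at h3
    rcases hd2 : s.2.2.1 with _ | w
    · simp only [h1, h2, minO]; omega
    · have := h3 w hd2; simp only [h1, h2, minO]; omega
  · omega
  · rw [if_neg hA] at h1 h2; rw [if_neg hB] at h3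
    rcases hd1 : s.2.1 with _ | v <;> rcases hd2 : s.2.2.1 with _ | w
    · simp only [h1, minO]; omega
    · have := h3 w hd2; simp only [h1, minO]; omega
    · have := h2 v hd1; simp only [h1, minO]; omega
    · have := h2 v hd1; have := h3 w hd2; simp only [h1, minO]; omega

-- stepA flattened to a single condition.
lemma stepA_char (A' : List Int) (s : Int × Int) (i : Int) :
    stepA A' s i = if ((i - s.2 ≥ 1 ∧ PySem.List.pyGetD A' i 0 + PySem.List.pyGetD A' (i-1) 0 < 0) ∨
        (i - s.2 ≥ 2 ∧ PySem.List.pyGetD A' i 0 + PySem.List.pyGetD A' (i-1) 0 + PySem.List.pyGetD A' (i-2) 0 < 0))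
      then (s.1 + 1, i + 1) else s := by
  unfold stepA
  split_ifs <;> first | rfl | tauto

-- One DP step preserves the invariant, in lockstep with the greedy decision.
lemma stepB_pres (A : List Int) (X : Int) (j : Nat) (res start : Int)
    (s : Int × Option Int × Option Int × Int × Int)
    (hj : j < A.length) (h0 : 0 ≤ start) (hs : start ≤ (j:Int))
    (hI : InvB (A.map (fun a => a - X)) start j res s) :
    (((start ≤ (j:Int) - 1 ∧ (A.map (fun a => a - X)).getD (j-1) 0 + (A[j] - X) < 0) ∨
      (start ≤ (j:Int) - 2 ∧ (A.map (fun a => a - X)).getD (j-2) 0 + (A.map (fun a => a - X)).getD (j-1) 0 + (A[j] - X) < 0))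
       → InvB (A.map (fun a => a - X)) ((j:Int) + 1) (j+1) (res+1) (stepB X s A[j])) ∧
    (¬ ((start ≤ (j:Int) - 1 ∧ (A.map (fun a => a - X)).getD (j-1) 0 + (A[j] - X) < 0) ∨
      (start ≤ (j:Int) - 2 ∧ (A.map (fun a => a - X)).getD (j-2) 0 + (A.map (fun a => a - X)).getD (j-1) 0 + (A[j] - X) < 0))
       → InvB (A.map (fun a => a - X)) start (j+1) res (stepB X s A[j])) := by
  obtain ⟨dE, d1, d2, p2, p1⟩ := s
  obtain ⟨h1, h2, h3, hp1, hp2⟩ := hI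
  replace h1 : dE = res + (if start ≤ (j:Int) - 1 then (1:Int) else 0) := h1
  replace h2 : (if start ≤ (j:Int) - 1 then d1 = some (res + (if start ≤ (j:Int) - 2 then (1:Int) else 0))
      else ∀ v, d1 = some v → res ≤ v) := h2
  replace h3 : (if start ≤ (j:Int) - 2 then d2 = some res else ∀ v, d2 = some v → res ≤ v) := h3
  replace hp1 : 1 ≤ j → p1 = (A.map (fun a => a - X)).getD (j-1) 0 := hp1
  replace hp2 : 2 ≤ j → p2 = (A.map (fun a => a - X)).getD (j-2) 0 := hp2
  have hbj : (A.map (fun a => a - X)).getD j 0 = A[j] - X := by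
    rw [List.getD_eq_getElem _ _ (by simpa using hj)]
    simp
  have hidx1 : ((j+1:Nat) : Int) - 1 = (j:Int) := by push_cast; ring
  have hidx2 : ((j+1:Nat) : Int) - 2 = (j:Int) - 1 := by push_cast; ring
  have hnat1 : (j+1) - 1 = j := by omega
  have hnat2 : (j+1) - 2 = j - 1 := by omega
  by_cases hA : start ≤ (j:Int) - 1
  · -- greedy segment has length ≥ 1
    have hj1 : 1 ≤ j := by omega
    have hp1' := hp1 hj1
    rw [if_pos hA] at h1 h2
    by_cases hB : start ≤ (j:Int) - 2
    · -- length ≥ 2: d1 = some (res+1), d2 = some res, p2 meaningful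
      have hj2 : 2 ≤ j := by omega
      have hp2' := hp2 hj2
      rw [if_pos hB] at h2 h3
      subst h1; subst h2; subst h3
      constructor
      · -- greedy deletes
        intro hC
        refine ⟨?_, ?_, ?_, ?_, ?_⟩
        · simp only [stepB, minO, hidx1]
          rw [if_neg (by omega : ¬ ((j:Int) + 1 ≤ (j:Int)))]
          omega
        · simp only [stepB, hidx1]
          rw [if_neg (by omega : ¬ ((j:Int) + 1 ≤ (j:Int)))]
          intro v hv
          simp only [Option.some.injEq] at hv
          omega
        · simp only [stepB, hidx2]
          rw [if_neg (by omega : ¬ ((j:Int) + 1 ≤ (j:Int) - 1))]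
          intro v hv
          rcases hC with ⟨-, hc⟩ | ⟨-, hc⟩ <;>
            split_ifs at hv with hg1 hg2 hg3 <;>
            simp only [Option.some.injEq] at hv <;>
            omega
        · intro _; simp only [stepB, hnat1, hbj]
        · intro _; simp only [stepB, hnat2]; exact hp1'
      · -- greedy keeps: both checks passed
        intro hC
        push_neg at hC
        have hpair : p1 + (A[j] - X) ≥ 0 := by have := hC.1 hA; omega
        have htri : p2 + p1 + (A[j] - X) ≥ 0 := by have := hC.2 hB; omega
        refine ⟨?_, ?_, ?_, ?_, ?_⟩
        · simp only [stepB, minO, hidx1]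
          rw [if_pos (by omega : start ≤ (j:Int))]
          omega
        · simp only [stepB, hidx1, hidx2]
          rw [if_pos (by omega : start ≤ (j:Int)), if_pos (by omega : start ≤ (j:Int) - 1)]
        · simp only [stepB, hidx2]
          rw [if_pos (by omega : start ≤ (j:Int) - 1), if_pos hpair, if_pos (And.intro hpair htri)]
          simp only [Option.some.injEq]
          omega
        · intro _; simp only [stepB, hnat1, hbj]
        · intro _; simp only [stepB, hnat2]; exact hp1'
    · -- length exactly 1: d1 = some res, d2 only bounded
      rw [if_neg hB] at h2 h3
      norm_num at h2
      subst h1; subst h2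
      constructor
      · -- greedy deletes: the pair check failed (the triple needs length ≥ 2)
        intro hC
        have hpair : ¬ (p1 + (A[j] - X) ≥ 0) := by
          rcases hC with ⟨-, hc⟩ | ⟨hc, -⟩
          · omega
          · omega
        refine ⟨?_, ?_, ?_, ?_, ?_⟩
        · simp only [stepB, minO, hidx1]
          rw [if_neg (by omega : ¬ ((j:Int) + 1 ≤ (j:Int)))]
          rcases d2 with _ | w
          · simp only [minO]; omega
          · have := h3 w rfl; simp only [minO]; omega
        · simp only [stepB, hidx1]
          rw [if_neg (by omega : ¬ ((j:Int) + 1 ≤ (j:Int)))]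
          intro v hv
          simp only [Option.some.injEq] at hv
          omega
        · simp only [stepB, hidx2]
          rw [if_neg (by omega : ¬ ((j:Int) + 1 ≤ (j:Int) - 1))]
          intro v hv
          have hng : ¬ (p1 + (A[j] - X) ≥ 0 ∧ p2 + p1 + (A[j] - X) ≥ 0) := fun h => hpair h.1
          rcases d2 with _ | w <;> simp [if_neg hpair, if_neg hng] at hv
        · intro _; simp only [stepB, hnat1, hbj]
        · intro _; simp only [stepB, hnat2]; exact hp1'
      · -- greedy keeps: pair check passed
        intro hC
        push_neg at hC
        have hpair : p1 + (A[j] - X) ≥ 0 := by have := hC.1 hA; omega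
        refine ⟨?_, ?_, ?_, ?_, ?_⟩
        · simp only [stepB, minO, hidx1]
          rw [if_pos (by omega : start ≤ (j:Int))]
          rcases d2 with _ | w
          · simp only [minO]; omega
          · have := h3 w rfl; simp only [minO]; omega
        · simp only [stepB, hidx1, hidx2]
          rw [if_pos (by omega : start ≤ (j:Int)), if_pos (by omega : start ≤ (j:Int) - 1)]
        · simp only [stepB, hidx2]
          rw [if_pos (by omega : start ≤ (j:Int) - 1)]
          rcases d2 with _ | w
          · simp only [if_pos hpair]
          · have hw := h3 w rfl
            simp only [if_pos hpair]
            by_cases hg : p1 + (A[j] - X) ≥ 0 ∧ p2 + p1 + (A[j] - X) ≥ 0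
            · rw [if_pos hg]; simp only [Option.some.injEq]; omega
            · rw [if_neg hg]
        · intro _; simp only [stepB, hnat1, hbj]
        · intro _; simp only [stepB, hnat2]; exact hp1'
  · -- empty greedy segment: start = j, keeping is unconditional
    have hB : ¬ start ≤ (j:Int) - 2 := by omega
    rw [if_neg hA] at h1 h2
    rw [if_neg hB] at h3
    subst h1
    constructor
    · intro hC
      exfalso
      rcases hC with ⟨h, -⟩ | ⟨h, -⟩ <;> omega
    · intro _hC
      refine ⟨?_, ?_, ?_, ?_, ?_⟩
      · simp only [stepB, minO, hidx1]
        rw [if_pos (by omega : start ≤ (j:Int))]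
        rcases hd1 : d1 with _ | v <;> rcases hd2 : d2 with _ | w
        · simp only [minO]; omega
        · have := h3 w hd2; simp only [minO]; omega
        · have := h2 v hd1; simp only [minO]; omega
        · have := h2 v hd1; have := h3 w hd2; simp only [minO]; omega
      · simp only [stepB, hidx1, hidx2]
        rw [if_pos (by omega : start ≤ (j:Int)), if_neg (by omega : ¬ start ≤ (j:Int) - 1)]
      · simp only [stepB, hidx2]
        rw [if_neg (by omega : ¬ start ≤ (j:Int) - 1)]
        intro u hu
        rcases hd1 : d1 with _ | v <;> rcases hd2 : d2 with _ | w <;> subst hd1 <;> subst hd2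
        · simp at hu
        · split_ifs at hu <;>
            first
              | (simp at hu; done)
              | ((try simp only [Option.some.injEq] at hu)
                 have := h3 w rfl
                 omega)
        · split_ifs at hu <;>
            first
              | (simp at hu; done)
              | ((try simp only [Option.some.injEq] at hu)
                 have := h2 v rfl
                 omega)
        · split_ifs at hu <;>
            first
              | (simp at hu; done)
              | ((try simp only [Option.some.injEq] at hu)
                 have := h2 v rfl
                 have := h3 w rfl
                 omega)
      · intro _; simp only [stepB, hnat1, hbj]
      · intro h2j; simp only [stepB, hnat2]; exact hp1 (by omega)

-- Main induction: A's remaining greedy scan from (res, start) returns the same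
-- count as the DP optimum of B's remaining fold from any invariant state.
lemma key (A : List Int) (X : Int) :
    ∀ (k j : Nat) (res start : Int) (s : Int × Option Int × Option Int × Int × Int),
    j + k ≤ A.length → 0 ≤ start → start ≤ (j:Int) →
    InvB (A.map (fun a => a - X)) start j res s →
    ((PySem.List.pyRange (j:Int) ((j+k : Nat):Int) 1).foldl (stepA (A.map (fun a => a - X))) (res, start)).1
    = (let f := (((A.drop j).take k).foldl (stepB X) s);
       minO (minO f.1 f.2.1) f.2.2.1) := by
  intro k
  induction k with
  | zero =>
    intro j res start s _ h0 hsj hI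
    rw [PySem.List.pyRange_one_eq_nil (by omega : ((j+0 : Nat):Int) ≤ (j:Int))]
    simpa using (bestOf_inv _ start j res s h0 hsj hI).symm
  | succ k ih =>
    intro j res start s hlen h0 hsj hI
    have hj : j < A.length := by omega
    rw [PySem.List.pyRange_one_cons (by push_cast; omega : (j:Int) < ((j+(k+1) : Nat):Int)),
        List.drop_eq_getElem_cons hj]
    simp only [List.foldl_cons, List.take_succ_cons]
    have hcast : (j:Int) + 1 = ((j+1 : Nat):Int) := by push_cast; ring
    have hcast2 : ((j+(k+1) : Nat):Int) = (((j+1)+k : Nat):Int) := by push_cast; ring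
    have hbj : PySem.List.pyGetD (A.map (fun a => a - X)) (j:Int) 0 = A[j] - X := by
      rw [PySem.List.pyGetD_natCast, List.getD_eq_getElem _ _ (by simpa using hj)]
      simp
    set V1 := (A.map (fun a => a - X)).getD (j-1) 0 with hV1
    set V2 := (A.map (fun a => a - X)).getD (j-2) 0 with hV2
    have hstep : stepA (A.map (fun a => a - X)) (res, start) (j:Int)
        = (if ((start ≤ (j:Int) - 1 ∧ V1 + (A[j] - X) < 0) ∨
               (start ≤ (j:Int) - 2 ∧ V2 + V1 + (A[j] - X) < 0))
           then ((res + 1 : Int), ((j:Int) + 1)) else (res, start)) := by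
      rw [stepA_char]
      simp only [hbj]
      by_cases h1 : start ≤ (j:Int) - 1
      · have hj1 : 1 ≤ j := by omega
        have e1 : (j:Int) - 1 = ((j-1 : Nat):Int) := by omega
        have hb1 : PySem.List.pyGetD (A.map (fun a => a - X)) ((j:Int)-1) 0 = V1 := by
          rw [e1, PySem.List.pyGetD_natCast]
        by_cases h2 : start ≤ (j:Int) - 2
        · have e2 : (j:Int) - 2 = ((j-2 : Nat):Int) := by omega
          have hb2 : PySem.List.pyGetD (A.map (fun a => a - X)) ((j:Int)-2) 0 = V2 := by
            rw [e2, PySem.List.pyGetD_natCast]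
          have a1 : (j:Int) - start ≥ 1 := by omega
          have a2 : (j:Int) - start ≥ 2 := by omega
          simp only [hb1, hb2, a1, a2, h1, h2, true_and]
          exact if_congr (by omega) rfl rfl
        · have a1 : (j:Int) - start ≥ 1 := by omega
          have na2 : ¬ ((j:Int) - start ≥ 2) := by omega
          simp only [hb1, a1, na2, h1, h2, true_and, false_and, or_false]
          exact if_congr (by omega) rfl rfl
      · have na1 : ¬ ((j:Int) - start ≥ 1) := by omega
        have na2 : ¬ ((j:Int) - start ≥ 2) := by omega
        have h2 : ¬ start ≤ (j:Int) - 2 := by omega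
        simp only [na1, na2, h1, h2, false_and, or_false, if_false]
    have hpres := stepB_pres A X j res start s hj h0 hsj hI
    simp only [← hV1, ← hV2] at hpres
    rw [hstep]
    by_cases hc : ((start ≤ (j:Int) - 1 ∧ V1 + (A[j] - X) < 0) ∨
               (start ≤ (j:Int) - 2 ∧ V2 + V1 + (A[j] - X) < 0))
    · rw [if_pos hc, hcast, hcast2,
          ih (j+1) (res+1) (((j+1:Nat)):Int) (stepB X s A[j]) (by omega) (by push_cast; omega)
             (by push_cast; omega) (hcast ▸ hpres.1 hc)]
    · rw [if_neg hc, hcast, hcast2,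
          ih (j+1) res start (stepB X s A[j]) (by omega) h0
             (by push_cast; omega) (hpres.2 hc)]

-- ===== VERDICT (by name: the statement is the Claim_ definition above) =====
theorem solve_spec : Claim_equal_solve := by
  intro N A X _ hpre
  unfold Spec_solve
  simp only [solve, solve_alt]
  by_cases hN : N ≤ 0
  · rw [PySem.List.pyRange_one_eq_nil hN, show max N 0 = (0:Int) by omega,
        PySem.List.slice_zero_start, PySem.List.slice_to A (le_refl 0)]
    simp [minO]
  · have hlen : N.toNat ≤ A.length := by unfold Pre_solve at hpre; omega
    have hI0 : InvB (A.map (fun a => a - X)) 0 0 0 (0, none, none, 0, 0) := by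
      unfold InvB; norm_num
      exact fun v h => nomatch h
    have hk := key A X N.toNat 0 0 0 (0, none, none, 0, 0) (by omega) (le_refl 0) (by norm_num) hI0
    simp only [Nat.cast_zero, Nat.zero_add, List.drop_zero] at hk
    rw [show max N 0 = ((N.toNat : Nat):Int) by omega, PySem.List.slice_zero_start,
        PySem.List.slice_to_natCast, show N = ((N.toNat:Nat):Int) by omega]
    simp only [Int.toNat_natCast]
    rw [hk]
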